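-- pv_equiv track=rewrite | github.com/Rodrigo188-a11y/-Machine-Learning-Regression-and-Classification | Lab4/code.py | index_count
-- ===== SOURCE A (Python) =====
-- def index_count(y):  # counts the indexes of each set and returns it
--     indices_background = []
--     indices_ring = []
--     indices_center = []
--     background_count = 0
--     ring_count = 0
--     center_count = 0
--
--     for i in range(len(y)):
--         if y[i] == 0:
--             indices_background.append(i)
--             background_count += 1
--         elif y[i] == 1:
--             indices_ring.append(i)
--             ring_count += 1
--         else:
--             indices_center.append(i)
--             center_count += 1
--     return indices_background, indices_ring, indices_center
-- ===== SOURCE B (Python) =====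
-- def index_count(y):  # counts the indexes of each set and returns it
--     background = [i for i, v in enumerate(y) if v == 0]
--     ring = [i for i, v in enumerate(y) if v == 1]
--     center = [i for i, v in enumerate(y) if v != 0 and v != 1]
--     return background, ring, center
-- ===== Notes on version B (the rewrite author's own statement) =====
-- stated objective: simpler
-- what changed: Replaces the single dispatching index loop with redundant counters by three independent filtered comprehensions over enumerate(y), one per returned list, with no counters.
import Mathlib
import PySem

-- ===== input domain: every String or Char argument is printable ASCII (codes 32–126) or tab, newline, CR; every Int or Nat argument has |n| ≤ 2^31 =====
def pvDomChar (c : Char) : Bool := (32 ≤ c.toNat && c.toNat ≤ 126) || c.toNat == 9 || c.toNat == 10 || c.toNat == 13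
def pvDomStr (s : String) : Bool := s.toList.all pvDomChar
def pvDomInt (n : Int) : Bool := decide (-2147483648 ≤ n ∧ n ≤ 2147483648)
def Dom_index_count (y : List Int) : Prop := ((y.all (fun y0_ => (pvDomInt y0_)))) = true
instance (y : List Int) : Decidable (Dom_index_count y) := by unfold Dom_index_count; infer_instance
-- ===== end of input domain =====

-- B replaces A's single dispatching loop (with its unused counters) by three
-- independent filtered comprehensions over enumerate(y): simpler decomposition, same cost.

-- ===== PORT A =====
-- single pass over range(len(y)), dispatching i into one of three accumulated lists
def index_count (y : List Int) : List Int × List Int × List Int :=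
  (PySem.List.pyRange 0 (PySem.List.len y) 1).foldl
    (fun (acc : List Int × List Int × List Int) i =>
      let v := PySem.List.pyGetD y i 0  -- y[i]; i is always in range here
      if v == 0 then (acc.1 ++ [i], acc.2.1, acc.2.2)
      else if v == 1 then (acc.1, acc.2.1 ++ [i], acc.2.2)
      else (acc.1, acc.2.1, acc.2.2 ++ [i]))
    ([], [], [])

-- ===== PORT B =====
def index_count_alt (y : List Int) : List Int × List Int × List Int :=
  (((PySem.List.enumerate y 0).filter (fun p => p.2 == 0)).map (·.1),
   ((PySem.List.enumerate y 0).filter (fun p => p.2 == 1)).map (·.1),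
   ((PySem.List.enumerate y 0).filter (fun p => p.2 != 0 && p.2 != 1)).map (·.1))

-- ===== PRECONDITION & SPEC =====
def Spec_index_count (y : List Int) (out : List Int × List Int × List Int) : Prop := out = index_count_alt y
instance (y : List Int) (out : List Int × List Int × List Int) : Decidable (Spec_index_count y out) := by unfold Spec_index_count; infer_instance

-- ===== CLAIM (what is proved, stated in full; the proofs are below) =====
def Claim_equal_index_count : Prop := ∀ (y : List Int), Dom_index_count y → Spec_index_count y (index_count y)

-- ===== LEMMAS AND PROOFS =====

-- the three-way dispatching fold over any list of pairs equals three filters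
theorem tri_fold (l : List (Int × Int)) (a b c : List Int) :
    l.foldl
      (fun (acc : List Int × List Int × List Int) (p : Int × Int) =>
        if p.2 == 0 then (acc.1 ++ [p.1], acc.2.1, acc.2.2)
        else if p.2 == 1 then (acc.1, acc.2.1 ++ [p.1], acc.2.2)
        else (acc.1, acc.2.1, acc.2.2 ++ [p.1]))
      (a, b, c)
    = (a ++ (l.filter (fun p => p.2 == 0)).map (·.1),
       b ++ (l.filter (fun p => p.2 == 1)).map (·.1),
       c ++ (l.filter (fun p => p.2 != 0 && p.2 != 1)).map (·.1)) := by
  induction l generalizing a b c with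
  | nil => simp
  | cons h t ih =>
    simp only [List.foldl_cons]
    by_cases h0 : h.2 = 0
    · rw [if_pos (by simp [h0] : (h.2 == 0) = true), ih]
      simp [h0]
    · by_cases h1 : h.2 = 1
      · rw [if_neg (by simp [h0] : ¬ (h.2 == 0) = true),
            if_pos (by simp [h1] : (h.2 == 1) = true), ih]
        simp [h1]
      · rw [if_neg (by simp [h0] : ¬ (h.2 == 0) = true),
            if_neg (by simp [h1] : ¬ (h.2 == 1) = true), ih]
        simp [h0, h1]

-- ===== VERDICT (by name: the statement is the Claim_ definition above) =====
theorem index_count_spec : Claim_equal_index_count := by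
  intro y _
  show index_count y = index_count_alt y
  unfold index_count index_count_alt
  rw [show PySem.List.pyRange 0 (PySem.List.len y) 1
        = (PySem.List.enumerate y 0).map (·.1) from by
      simp [PySem.List.map_fst_enumerate],
    List.foldl_map]
  refine (PySem.List.foldl_congr_mem _ _ _ _ ?_).trans ((tri_fold _ [] [] []).trans (by simp))
  intro acc p hp
  rcases (PySem.List.mem_enumerate_iff _ _ _).mp hp with ⟨k, hk, rfl⟩
  simp [List.getElem?_eq_getElem hk]
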